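-- pv_equiv track=rewrite | github.com/simaataei/SGI-Labeler | Methods/Static_methods.py | label_data
-- ===== SOURCE A (Python) =====
-- def label_data(C2GO, acc2GO):
--     data_label_dict = {}
--     for acc in acc2GO:
--         data_label_dict[acc] = []
--     label_list = {}
--     i = 0
--     for c in C2GO:
--         label_list[c] = i
--         i += 1
--     for item in C2GO.keys():
--         for seq in acc2GO.keys():
--             if set(C2GO[item]).intersection(acc2GO[seq]):
--                 data_label_dict[seq].append(item)
--
--     return data_label_dict
-- ===== SOURCE B (Python) =====
-- def label_data(C2GO, acc2GO):
--     # Inverted index: GO term -> [(class position, class name)], built once.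
--     inv = {}
--     for idx, (cls, gos) in enumerate(C2GO.items()):
--         for g in gos:
--             inv.setdefault(g, []).append((idx, cls))
--     out = {}
--     for seq, gos in acc2GO.items():
--         hits = {}
--         for g in gos:
--             for idx, cls in inv.get(g, ()):
--                 hits[idx] = cls
--         out[seq] = [hits[i] for i in sorted(hits)]
--     return out
-- ===== Notes on version B (the rewrite author's own statement) =====
-- stated objective: faster
-- what changed: A scans every (class, sequence) pair and intersects their GO sets; B builds a GO-term-to-(class position, class name) inverted index once, then each sequence collects its hit positions through its own GO terms and emits the class names in ascending position, so classes sharing no GO term with a sequence are never touched.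
import Mathlib
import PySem

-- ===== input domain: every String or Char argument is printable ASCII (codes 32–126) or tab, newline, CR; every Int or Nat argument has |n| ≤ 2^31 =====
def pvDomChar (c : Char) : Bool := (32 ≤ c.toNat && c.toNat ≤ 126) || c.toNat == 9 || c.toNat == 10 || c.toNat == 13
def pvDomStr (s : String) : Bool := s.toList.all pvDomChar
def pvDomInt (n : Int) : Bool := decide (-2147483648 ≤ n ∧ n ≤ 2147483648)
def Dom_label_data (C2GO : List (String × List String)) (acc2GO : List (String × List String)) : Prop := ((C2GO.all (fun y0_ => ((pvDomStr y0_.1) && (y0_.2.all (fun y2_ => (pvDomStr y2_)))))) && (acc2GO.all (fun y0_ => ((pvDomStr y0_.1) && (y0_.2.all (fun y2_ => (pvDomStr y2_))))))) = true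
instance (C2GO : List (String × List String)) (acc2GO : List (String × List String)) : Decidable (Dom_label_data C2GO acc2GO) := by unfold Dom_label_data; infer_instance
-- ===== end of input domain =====

-- B replaces A's class-major scan over all (class, sequence) pairs by a GO-term→classes
-- inverted index queried once per sequence (objective: faster on sparse data).

-- ===== PORT A =====
-- A builds a dict acc→[], an unused index dict label_list, then for each class and each
-- sequence appends the class name when the GO sets intersect.
def label_data (C2GO : List (String × List String)) (acc2GO : List (String × List String)) : List (String × List String) :=
  let data_label_dict : PySem.Dict String (List String) :=
    acc2GO.foldl (fun d acc => d.insert acc.1 []) PySem.Dict.empty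
  let _label_list : PySem.Dict String Int × Int :=
    C2GO.foldl (fun p c => (p.1.insert c.1 p.2, p.2 + 1)) (PySem.Dict.empty, 0)
  let d : PySem.Dict String (List String) :=
    C2GO.foldl (fun d item =>
      acc2GO.foldl (fun d seq =>
        if !(PySem.Set.inter (PySem.Set.ofList ((PySem.Dict.mk C2GO).getD item.1 []))
              ((PySem.Dict.mk acc2GO).getD seq.1 [])).isEmpty
        then d.modify seq.1 [] (fun l => l ++ [item.1]) else d) d) data_label_dict
  d.items

-- ===== PORT B =====
-- B: invert GO term → [(class position, class name)], then per sequence collect the hit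
-- positions through its own GO terms and emit the class names in ascending position.
def label_data_alt (C2GO : List (String × List String)) (acc2GO : List (String × List String)) : List (String × List String) :=
  let inv : PySem.Dict String (List (Int × String)) :=
    (PySem.List.enumerate C2GO).foldl (fun d p =>
      p.2.2.foldl (fun d g => d.modify g [] (fun l => l ++ [(p.1, p.2.1)])) d) PySem.Dict.empty
  let out : PySem.Dict String (List String) :=
    acc2GO.foldl (fun o a =>
      let hits : PySem.Dict Int String :=
        a.2.foldl (fun h g => (inv.getD g []).foldl (fun h q => h.insert q.1 q.2) h) PySem.Dict.empty
      o.insert a.1 ((PySem.List.sorted hits.keys (fun i => i) false).map (fun i => hits.getD i ""))) PySem.Dict.empty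
  out.items

-- ===== PRECONDITION & SPEC =====
-- Both parameters are Python dicts; their association-list encodings have pairwise
-- distinct keys, so Pre_ excludes duplicate-key lists, which represent no dict input.
def Pre_label_data (C2GO : List (String × List String)) (acc2GO : List (String × List String)) : Prop :=
  (C2GO.map Prod.fst).Nodup ∧ (acc2GO.map Prod.fst).Nodup
instance (C2GO : List (String × List String)) (acc2GO : List (String × List String)) : Decidable (Pre_label_data C2GO acc2GO) := by unfold Pre_label_data; infer_instance
def pvWitness_label_data : (List (String × List String)) × (List (String × List String)) :=
  ([("c1", ["GO:1", "GO:2"]), ("c2", ["GO:3"])], [("s1", ["GO:2", "GO:3"]), ("s2", ["GO:9"])])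
def Spec_label_data (C2GO : List (String × List String)) (acc2GO : List (String × List String)) (out : List (String × List String)) : Prop := out = label_data_alt C2GO acc2GO
instance (C2GO : List (String × List String)) (acc2GO : List (String × List String)) (out : List (String × List String)) : Decidable (Spec_label_data C2GO acc2GO out) := by unfold Spec_label_data; infer_instance

-- ===== CLAIM (what is proved, stated in full; the proofs are below) =====
def Claim_equal_label_data : Prop := ∀ (C2GO : List (String × List String)) (acc2GO : List (String × List String)), Dom_label_data C2GO acc2GO → Pre_label_data C2GO acc2GO → Spec_label_data C2GO acc2GO (label_data C2GO acc2GO)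

-- ===== LEMMAS AND PROOFS =====

-- The common normal form both ports are reduced to.
def pvHit (gos seqgos : List String) : Bool :=
  !(PySem.Set.inter (PySem.Set.ofList gos) seqgos).isEmpty

def pvCanon (C2GO acc2GO : List (String × List String)) : List (String × List String) :=
  acc2GO.map (fun a => (a.1, (C2GO.filter (fun c => pvHit c.2 a.2)).map (·.1)))

def pvInv (C : List (String × List String)) : PySem.Dict String (List (Int × String)) :=
  (PySem.List.enumerate C).foldl (fun d p =>
    p.2.2.foldl (fun d g => d.modify g [] (fun l => l ++ [(p.1, p.2.1)])) d) PySem.Dict.empty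

def pvHits (C : List (String × List String)) (gos : List String) : PySem.Dict Int String :=
  gos.foldl (fun h g => ((pvInv C).getD g []).foldl (fun h q => h.insert q.1 q.2) h) PySem.Dict.empty

def pvLa (C : List (String × List String)) (gos : List String) : List (Int × String) :=
  gos.flatMap (fun g => (pvInv C).getD g [])

def pvLp (C : List (String × List String)) : List (String × (Int × String)) :=
  (PySem.List.enumerate C).flatMap (fun p => p.2.2.map (fun g => (g, (p.1, p.2.1))))

def pvF (C : List (String × List String)) (i : Int) : String :=
  (C.map Prod.fst).getD i.toNat ""

def pvIa (C : List (String × List String)) (seqgos : List String) : List Int :=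
  ((PySem.List.enumerate C).filter (fun p => pvHit p.2.2 seqgos)).map (·.1)

theorem pvHit_iff (gos seqgos : List String) :
    pvHit gos seqgos = true ↔ ∃ g, g ∈ gos ∧ g ∈ seqgos := by
  simp [pvHit, PySem.Set.inter, PySem.Set.mem_ofList]

theorem pv_foldl_flatMap {α β γ : Type} (l : List α) (g : α → List β) (f : γ → β → γ) (init : γ) :
    l.foldl (fun acc x => (g x).foldl f acc) init = (l.flatMap g).foldl f init := by
  induction l generalizing init with
  | nil => rfl
  | cons x xs ih => simp [List.flatMap_cons, List.foldl_append, ih]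

theorem pv_flatMap_if {α β : Type} (C : List α) (p : α → Bool) (f : α → β) :
    C.flatMap (fun c => if p c then [f c] else []) = (C.filter p).map f := by
  induction C with
  | nil => rfl
  | cons c C ih => by_cases hc : p c = true <;> simp [hc, ih]

theorem pv_filter_key_none (k : String) (q : (String × List String) → Bool)
    (acc : List (String × List String)) (h : ∀ s ∈ acc, s.1 ≠ k) :
    acc.filter (fun s => s.1 == k && q s) = [] := by
  rw [List.filter_eq_nil_iff]
  intro s hs
  simp [h s hs]

theorem pv_filter_key (q : (String × List String) → Bool)
    (acc : List (String × List String)) (a : String × List String)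
    (hnd : (acc.map Prod.fst).Nodup) (ha : a ∈ acc) :
    acc.filter (fun s => s.1 == a.1 && q s) = if q a then [a] else [] := by
  induction acc with
  | nil => cases ha
  | cons s acc ih =>
    rw [List.map_cons, List.nodup_cons] at hnd
    rcases List.mem_cons.mp ha with rfl | ha'
    · have : acc.filter (fun s' => s'.1 == a.1 && q s') = [] := by
        apply pv_filter_key_none
        intro t ht he
        exact hnd.1 (he ▸ List.mem_map_of_mem ht)
      by_cases hq : q a = true <;> simp [hq, this]
    · have hne : s.1 ≠ a.1 := by
        intro he
        exact hnd.1 (he ▸ List.mem_map_of_mem ha')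
      simp only [List.filter_cons]
      rw [ih hnd.2 ha']
      simp [hne]

theorem pv_inner_getD (x : String) (cond : (String × List String) → Bool)
    (acc : List (String × List String)) (d : PySem.Dict String (List String)) (k : String) :
    (acc.foldl (fun d seq => if cond seq then d.modify seq.1 [] (fun l => l ++ [x]) else d) d).getD k []
      = d.getD k [] ++ (acc.filter (fun s => s.1 == k && cond s)).map (fun _ => x) := by
  induction acc generalizing d with
  | nil => simp
  | cons s acc ih =>
    simp only [List.foldl_cons, List.filter_cons, ih]
    by_cases hc : cond s = true
    · by_cases hk : s.1 = k
      · simp [hc, hk]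
      · simp [hc, hk, Ne.symm hk, PySem.Dict.getD_modify]
    · simp [hc]

theorem pv_inner_keys (x : String) (cond : (String × List String) → Bool)
    (acc : List (String × List String)) (d : PySem.Dict String (List String))
    (h : ∀ s ∈ acc, s.1 ∈ d.keys) :
    (acc.foldl (fun d seq => if cond seq then d.modify seq.1 [] (fun l => l ++ [x]) else d) d).keys
      = d.keys := by
  induction acc generalizing d with
  | nil => rfl
  | cons s acc ih =>
    simp only [List.foldl_cons]
    by_cases hc : cond s = true
    · have hk : (d.modify s.1 [] (fun l => l ++ [x])).keys = d.keys := by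
        rw [PySem.Dict.keys_modify, PySem.Dict.keys_insert_of_contains]
        exact (PySem.Dict.contains_iff_mem_keys d s.1).mpr (h s (List.mem_cons_self))
      rw [hc]
      simp only [if_true]
      rw [ih _ (fun t ht => hk ▸ h t (List.mem_cons_of_mem _ ht)), hk]
    · simp only [hc, Bool.false_eq_true, if_false]
      exact ih d (fun t ht => h t (List.mem_cons_of_mem _ ht))

theorem pv_outer_getD (C acc : List (String × List String))
    (d : PySem.Dict String (List String)) (k : String) :
    (C.foldl (fun d item =>
        acc.foldl (fun d seq => if pvHit item.2 seq.2 then d.modify seq.1 [] (fun l => l ++ [item.1]) else d) d) d).getD k []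
      = d.getD k [] ++ C.flatMap (fun item => (acc.filter (fun s => s.1 == k && pvHit item.2 s.2)).map (fun _ => item.1)) := by
  induction C generalizing d with
  | nil => simp
  | cons it C ih =>
    simp only [List.foldl_cons, List.flatMap_cons, ih, pv_inner_getD, List.append_assoc]

theorem pv_outer_keys (C acc : List (String × List String))
    (d : PySem.Dict String (List String)) (h : ∀ s ∈ acc, s.1 ∈ d.keys) :
    (C.foldl (fun d item =>
        acc.foldl (fun d seq => if pvHit item.2 seq.2 then d.modify seq.1 [] (fun l => l ++ [item.1]) else d) d) d).keys
      = d.keys := by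
  induction C generalizing d with
  | nil => rfl
  | cons it C ih =>
    simp only [List.foldl_cons]
    have hk := pv_inner_keys it.1 (fun s => pvHit it.2 s.2) acc d h
    rw [ih _ (fun t ht => hk ▸ h t ht), hk]

theorem pv_mk_getD (l : List (String × List String)) (p : String × List String)
    (hnd : (l.map Prod.fst).Nodup) (hp : p ∈ l) :
    (PySem.Dict.mk l).getD p.1 [] = p.2 := by
  apply PySem.Dict.getD_of_mem_items (d := PySem.Dict.mk l)
  · exact hp
  · simpa [PySem.Dict.keys_mk] using hnd

theorem pv_A_canon (C2GO acc2GO : List (String × List String))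
    (hC : (C2GO.map Prod.fst).Nodup) (hA : (acc2GO.map Prod.fst).Nodup) :
    label_data C2GO acc2GO = pvCanon C2GO acc2GO := by
  unfold label_data
  simp only []
  -- replace the dict lookups in the loop body by the pair components
  rw [PySem.List.foldl_congr_mem _ _
    (fun d item => acc2GO.foldl (fun d seq =>
        if pvHit item.2 seq.2 then d.modify seq.1 [] (fun l => l ++ [item.1]) else d) d) _
    (by
      intro d item hitem
      apply PySem.List.foldl_congr_mem
      intro d' seq hseq
      rw [pv_mk_getD C2GO item hC hitem, pv_mk_getD acc2GO seq hA hseq]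
      rfl)]
  -- the initial dict
  have hinit : (acc2GO.foldl (fun d acc => d.insert acc.1 []) PySem.Dict.empty).items
      = acc2GO.map (fun a => (a.1, ([] : List String))) := by
    have := PySem.Dict.items_foldl_insert_fresh acc2GO (fun a => a.1) (fun _ => ([] : List String))
      PySem.Dict.empty (by intro a _; rfl) hA
    simpa using this
  set dlab := acc2GO.foldl (fun d acc => d.insert acc.1 []) PySem.Dict.empty with hdlab
  have hkeys : dlab.keys = acc2GO.map Prod.fst := by
    show dlab.items.map Prod.fst = _
    rw [hinit, List.map_map]
    rfl
  have hmem : ∀ s ∈ acc2GO, s.1 ∈ dlab.keys := by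
    intro s hs; rw [hkeys]; exact List.mem_map_of_mem hs
  set dfin := C2GO.foldl (fun d item =>
      acc2GO.foldl (fun d seq =>
        if pvHit item.2 seq.2 then d.modify seq.1 [] (fun l => l ++ [item.1]) else d) d) dlab with hdfin
  have hkf : dfin.keys = acc2GO.map Prod.fst := by
    rw [hdfin, pv_outer_keys _ _ _ hmem, hkeys]
  have hitems := PySem.Dict.items_eq_map_keys dfin (hkf ▸ hA) []
  rw [hitems, hkf, List.map_map]
  unfold pvCanon
  apply List.map_congr_left
  intro a ha
  simp only [Function.comp]
  congr 1
  have hbase : dlab.getD a.1 [] = [] := by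
    apply PySem.Dict.getD_of_mem_items (d := dlab) (v := ([] : List String))
    · rw [hinit]; exact List.mem_map_of_mem ha
    · show dlab.keys.Nodup
      rw [hkeys]; exact hA
  rw [hdfin, pv_outer_getD, hbase, List.nil_append]
  have : ∀ item : String × List String,
      (acc2GO.filter (fun s => s.1 == a.1 && pvHit item.2 s.2)).map (fun _ => item.1)
        = if pvHit item.2 a.2 then [item.1] else [] := by
    intro item
    rw [pv_filter_key _ _ _ hA ha]
    by_cases h : pvHit item.2 a.2 = true <;> simp [h]
  rw [List.flatMap_congr (fun item _ => this item), pv_flatMap_if]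

theorem pv_inv_eq (C : List (String × List String)) :
    pvInv C = (pvLp C).foldl (fun d q => d.modify q.1 [] (fun l => l ++ [q.2])) PySem.Dict.empty := by
  unfold pvInv pvLp
  rw [← pv_foldl_flatMap]
  apply PySem.List.foldl_congr_mem
  intro d p _
  rw [List.foldl_map]

theorem pv_inv_getD (C : List (String × List String)) (g : String) :
    (pvInv C).getD g [] = ((pvLp C).filter (fun q => q.1 == g)).map (·.2) := by
  rw [pv_inv_eq, PySem.Dict.getD_foldl_modify_append]
  simp

theorem pv_mem_inv (C : List (String × List String)) (g : String) (q : Int × String) :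
    q ∈ (pvInv C).getD g [] ↔ ∃ p ∈ PySem.List.enumerate C, g ∈ p.2.2 ∧ q = (p.1, p.2.1) := by
  rw [pv_inv_getD]
  simp only [pvLp, List.mem_map, List.mem_filter, List.mem_flatMap]
  constructor
  · rintro ⟨x, ⟨⟨p, hp, g', hg', rfl⟩, hg⟩, rfl⟩
    have hgg : g' = g := by simpa using hg
    subst hgg
    exact ⟨p, hp, hg', rfl⟩
  · rintro ⟨p, hp, hg, rfl⟩
    exact ⟨(g, (p.1, p.2.1)), ⟨⟨p, hp, g, hg, rfl⟩, by simp⟩, rfl⟩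

theorem pv_hits_eq (C : List (String × List String)) (gos : List String) :
    pvHits C gos = (pvLa C gos).foldl (fun h q => h.insert q.1 q.2) PySem.Dict.empty := by
  unfold pvHits pvLa
  rw [← pv_foldl_flatMap]

theorem pv_hits_keys (C : List (String × List String)) (gos : List String) :
    (pvHits C gos).keys = PySem.Set.ofList ((pvLa C gos).map (·.1)) := by
  rw [pv_hits_eq]
  have := PySem.Dict.keys_foldl_insert_key (pvLa C gos) (fun q => q.1) (fun _ q => q.2) PySem.Dict.empty
  simpa [PySem.Set.ofList_eq_foldl, PySem.Set.update] using this

theorem pv_hits_nodup (C : List (String × List String)) (gos : List String) :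
    (pvHits C gos).keys.Nodup := by
  rw [pv_hits_eq]
  exact PySem.Dict.nodup_keys_foldl_insert_key (pvLa C gos) (fun q : Int × String => q.1)
    (fun (_ : PySem.Dict Int String) (q : Int × String) => q.2) PySem.Dict.empty (by simp)

theorem pv_La_fun (C : List (String × List String)) (gos : List String) (q : Int × String)
    (hq : q ∈ pvLa C gos) : pvF C q.1 = q.2 := by
  rcases List.mem_flatMap.mp hq with ⟨g, _, hmem⟩
  rcases (pv_mem_inv C g q).mp hmem with ⟨p, hp, _, rfl⟩
  rcases (PySem.List.mem_enumerate_iff C 0 p).mp hp with ⟨k, hk, rfl⟩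
  simp [pvF, List.getD_eq_getElem?_getD, hk]

theorem pv_get?_fold_insert (L : List (Int × String)) (F : Int → String)
    (hL : ∀ q ∈ L, F q.1 = q.2) (d : PySem.Dict Int String)
    (hd : ∀ i c, d.get? i = some c → F i = c) :
    ∀ i c, (L.foldl (fun h q => h.insert q.1 q.2) d).get? i = some c → F i = c := by
  induction L generalizing d with
  | nil => exact hd
  | cons q L ih =>
    intro i c h
    refine ih (fun r hr => hL r (List.mem_cons_of_mem _ hr)) _ ?_ i c h
    intro j e hj
    rw [PySem.Dict.get?_insert] at hj
    by_cases hji : j = q.1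
    · rw [if_pos hji] at hj
      cases hj
      exact hji ▸ hL q List.mem_cons_self
    · rw [if_neg hji] at hj
      exact hd j e hj

theorem pv_hits_getD (C : List (String × List String)) (gos : List String) (i : Int)
    (hi : i ∈ (pvHits C gos).keys) : (pvHits C gos).getD i "" = pvF C i := by
  have hs : (pvHits C gos).get? i ≠ none := by
    rw [ne_eq, PySem.Dict.get?_eq_none_iff_not_mem_keys]
    simpa using hi
  rcases Option.ne_none_iff_exists'.mp hs with ⟨c, hc⟩
  have : pvF C i = c := by
    rw [pv_hits_eq] at hc
    exact pv_get?_fold_insert (pvLa C gos) (pvF C) (pv_La_fun C gos) _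
      (by intro _ _ h; simp [PySem.Dict.get?_empty] at h) i c hc
  rw [PySem.Dict.getD_eq_get?_getD, hc, this]
  rfl

theorem pv_mem_keys_iff (C : List (String × List String)) (gos : List String) (i : Int) :
    i ∈ (pvHits C gos).keys ↔ ∃ p ∈ PySem.List.enumerate C, p.1 = i ∧ ∃ g ∈ gos, g ∈ p.2.2 := by
  rw [pv_hits_keys, PySem.Set.mem_ofList]
  simp only [List.mem_map, pvLa, List.mem_flatMap]
  constructor
  · rintro ⟨q, ⟨g, hg, hq⟩, rfl⟩
    rcases (pv_mem_inv C g q).mp hq with ⟨p, hp, hgp, rfl⟩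
    exact ⟨p, hp, rfl, g, hg, hgp⟩
  · rintro ⟨p, hp, rfl, g, hg, hgp⟩
    exact ⟨(p.1, p.2.1), ⟨g, hg, (pv_mem_inv C g _).mpr ⟨p, hp, hgp, rfl⟩⟩, rfl⟩

theorem pv_mem_Ia_iff (C : List (String × List String)) (gos : List String) (i : Int) :
    i ∈ pvIa C gos ↔ i ∈ (pvHits C gos).keys := by
  rw [pv_mem_keys_iff]
  simp only [pvIa, List.mem_map, List.mem_filter]
  constructor
  · rintro ⟨p, ⟨hp, hhit⟩, rfl⟩
    rcases (pvHit_iff _ _).mp hhit with ⟨g, hg1, hg2⟩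
    exact ⟨p, hp, rfl, g, hg2, hg1⟩
  · rintro ⟨p, hp, rfl, g, hg, hgp⟩
    exact ⟨p, ⟨hp, (pvHit_iff _ _).mpr ⟨g, hgp, hg⟩⟩, rfl⟩

theorem pv_sorted_keys (C : List (String × List String)) (gos : List String) :
    PySem.List.sorted (pvHits C gos).keys (fun i => i) false = pvIa C gos := by
  have hpw : (pvIa C gos).Pairwise (· < ·) :=
    List.pairwise_map.mpr ((PySem.List.pairwise_lt_enumerate C 0).filter _)
  apply PySem.List.sorted_eq_of_perm_of_pairwise_lt
  · rw [List.perm_ext_iff_of_nodup (hpw.imp (fun h => ne_of_lt h)) (pv_hits_nodup C gos)]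
    exact pv_mem_Ia_iff C gos
  · exact hpw

theorem pv_enum_filter_map {β : Type} (C : List (String × List String))
    (Q : List String → Bool) (f : String × List String → β) (s : Int) :
    ((PySem.List.enumerate C s).filter (fun p => Q p.2.2)).map (fun p => f p.2)
      = (C.filter (fun c => Q c.2)).map f := by
  induction C generalizing s with
  | nil => rfl
  | cons c C ih =>
    rw [PySem.List.enumerate_cons]
    by_cases hc : Q c.2 = true <;> simp [hc, ih]

theorem pv_val (C : List (String × List String)) (gos : List String) :
    (PySem.List.sorted (pvHits C gos).keys (fun i => i) false).map (fun i => (pvHits C gos).getD i "")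
      = (C.filter (fun c => pvHit c.2 gos)).map (·.1) := by
  rw [pv_sorted_keys]
  have h1 : (pvIa C gos).map (fun i => (pvHits C gos).getD i "") = (pvIa C gos).map (pvF C) :=
    List.map_congr_left (fun i hi => pv_hits_getD C gos i ((pv_mem_Ia_iff C gos i).mp hi))
  rw [h1]
  unfold pvIa
  rw [List.map_map]
  have h2 : ((PySem.List.enumerate C).filter (fun p => pvHit p.2.2 gos)).map (pvF C ∘ (·.1))
      = ((PySem.List.enumerate C).filter (fun p => pvHit p.2.2 gos)).map (fun p => p.2.1) := by
    apply List.map_congr_left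
    intro p hp
    have hp' := List.mem_of_mem_filter hp
    rcases (PySem.List.mem_enumerate_iff C 0 p).mp hp' with ⟨k, hk, rfl⟩
    simp [pvF, List.getD_eq_getElem?_getD, hk]
  rw [h2]
  exact pv_enum_filter_map C (fun x => pvHit x gos) Prod.fst 0

theorem pv_B_canon (C2GO acc2GO : List (String × List String))
    (hA : (acc2GO.map Prod.fst).Nodup) :
    label_data_alt C2GO acc2GO = pvCanon C2GO acc2GO := by
  have hrfl : label_data_alt C2GO acc2GO
      = (acc2GO.foldl (fun o a => o.insert a.1
          ((PySem.List.sorted (pvHits C2GO a.2).keys (fun i => i) false).map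
            (fun i => (pvHits C2GO a.2).getD i ""))) PySem.Dict.empty).items := rfl
  rw [hrfl, PySem.Dict.items_foldl_insert_fresh acc2GO (fun a => a.1)
    (fun a => (PySem.List.sorted (pvHits C2GO a.2).keys (fun i => i) false).map
      (fun i => (pvHits C2GO a.2).getD i "")) PySem.Dict.empty (fun a _ => rfl) hA]
  rw [show (PySem.Dict.empty : PySem.Dict String (List String)).items = [] from rfl,
    List.nil_append]
  unfold pvCanon
  exact List.map_congr_left (fun a _ => by rw [pv_val])

-- ===== VERDICT (by name: the statement is the Claim_ definition above) =====
theorem label_data_spec : Claim_equal_label_data := by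
  intro C2GO acc2GO _hdom hpre
  unfold Spec_label_data
  rw [pv_A_canon C2GO acc2GO hpre.1 hpre.2, pv_B_canon C2GO acc2GO hpre.2]
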